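-- pv_equiv track=rewrite | github.com/imitrob/crow-base | src/crow_logic/crow_logic/testing/dummy_nl_input_curses.py | translate_query
-- ===== SOURCE A (Python) =====
-- class BINDINGS:
--     bindings = {
--         "command": {'1': 'ukaž', '2': 'seber', '3': 'polož', '4': 'podej', '5': 'ukliď',
--                     '6': 'pustit', '7': 'úložiště', '8': 'pozice', '9': 'Odstraň poslední příkaz',
--                     '0': 'Odstraň příkaz', ' ': ' '},
--         "object": {'q': 'kostka', 'w': 'kolo', 'e': 'střecha', 'r': 'lžíce', 't': 'koule', 'y': 'destička',
--                    'u': 'matka', 'i': 'šroub', 'm': 'klíč', 'n': 'šroubovák', 'b': 'kleště', 'v': 'kladivo',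
--                    'c': 'to', ' ': ' '},
--         "color": {'a': 'červená', 's': 'vínová', 'd': 'modrá', 'f': 'zelená', 'g': 'fialová', 'h': 'zlatá',
--                   'j': 'bílá', ' ': ' '},
--         "location": {'z': 'sklad', 'x': 'stůl', ' ': ' '},
--     }
--
--     bindings_arr = [bindings["command"], bindings["object"], bindings["color"], bindings["location"]]
--
-- def translate_query(chars):
--     query = ""
--     for binding_dict in BINDINGS.bindings_arr:
--         for c in chars:
--             if c in binding_dict:
--                 query += binding_dict[c] + " "
--     query = query.strip()
--     return query
-- ===== SOURCE B (Python) =====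
-- # Reverse key table precomputed once: key char -> (category index, word).
-- # Space is a key of all four category dicts, so it is handled separately.
-- _REV = {
--     '1': (0, 'ukaž'), '2': (0, 'seber'), '3': (0, 'polož'), '4': (0, 'podej'),
--     '5': (0, 'ukliď'), '6': (0, 'pustit'), '7': (0, 'úložiště'), '8': (0, 'pozice'),
--     '9': (0, 'Odstraň poslední příkaz'), '0': (0, 'Odstraň příkaz'),
--     'q': (1, 'kostka'), 'w': (1, 'kolo'), 'e': (1, 'střecha'), 'r': (1, 'lžíce'),
--     't': (1, 'koule'), 'y': (1, 'destička'), 'u': (1, 'matka'), 'i': (1, 'šroub'),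
--     'm': (1, 'klíč'), 'n': (1, 'šroubovák'), 'b': (1, 'kleště'), 'v': (1, 'kladivo'),
--     'c': (1, 'to'),
--     'a': (2, 'červená'), 's': (2, 'vínová'), 'd': (2, 'modrá'), 'f': (2, 'zelená'),
--     'g': (2, 'fialová'), 'h': (2, 'zlatá'), 'j': (2, 'bílá'),
--     'z': (3, 'sklad'), 'x': (3, 'stůl'),
-- }
--
--
-- def translate_query(chars):
--     b0, b1, b2, b3 = [], [], [], []
--     for c in chars:
--         if c == ' ':
--             b0.append('  ')
--             b1.append('  ')
--             b2.append('  ')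
--             b3.append('  ')
--         else:
--             hit = _REV.get(c)
--             if hit is None:
--                 continue
--             i, v = hit
--             if i == 0:
--                 b0.append(v + ' ')
--             elif i == 1:
--                 b1.append(v + ' ')
--             elif i == 2:
--                 b2.append(v + ' ')
--             else:
--                 b3.append(v + ' ')
--     return ''.join(b0 + b1 + b2 + b3).strip()
-- ===== Notes on version B (the rewrite author's own statement) =====
-- stated objective: alternative
-- what changed: B precomputes a reverse table mapping each non-space key char to its (category, word) and makes one recursive pass over chars carrying four category buckets (space goes into all four), instead of A's four full scans of chars, one per binding dict.
import Mathlib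
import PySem

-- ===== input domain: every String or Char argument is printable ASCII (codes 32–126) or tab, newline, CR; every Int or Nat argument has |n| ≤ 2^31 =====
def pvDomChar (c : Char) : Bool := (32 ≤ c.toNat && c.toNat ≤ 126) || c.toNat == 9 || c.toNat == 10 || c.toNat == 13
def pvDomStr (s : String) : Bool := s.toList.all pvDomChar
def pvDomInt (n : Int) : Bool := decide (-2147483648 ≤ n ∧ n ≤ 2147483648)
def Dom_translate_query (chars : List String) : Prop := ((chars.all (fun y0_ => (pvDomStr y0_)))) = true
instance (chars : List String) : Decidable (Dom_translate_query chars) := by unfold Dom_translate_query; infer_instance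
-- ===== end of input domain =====

-- B replaces A's four scans of `chars` (one per binding dict) by a single recursive pass
-- dispatching each char through a precomputed reverse key table into four category buckets
-- (objective: alternative single-pass structure).

-- ===== PORT A =====
def dCommand : PySem.Dict String (List Char) :=
  PySem.Dict.ofList [("1", "ukaž".toList), ("2", "seber".toList), ("3", "polož".toList), ("4", "podej".toList), ("5", "ukliď".toList), ("6", "pustit".toList), ("7", "úložiště".toList), ("8", "pozice".toList), ("9", "Odstraň poslední příkaz".toList), ("0", "Odstraň příkaz".toList), (" ", " ".toList)]

def dObject : PySem.Dict String (List Char) :=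
  PySem.Dict.ofList [("q", "kostka".toList), ("w", "kolo".toList), ("e", "střecha".toList), ("r", "lžíce".toList), ("t", "koule".toList), ("y", "destička".toList), ("u", "matka".toList), ("i", "šroub".toList), ("m", "klíč".toList), ("n", "šroubovák".toList), ("b", "kleště".toList), ("v", "kladivo".toList), ("c", "to".toList), (" ", " ".toList)]

def dColor : PySem.Dict String (List Char) :=
  PySem.Dict.ofList [("a", "červená".toList), ("s", "vínová".toList), ("d", "modrá".toList), ("f", "zelená".toList), ("g", "fialová".toList), ("h", "zlatá".toList), ("j", "bílá".toList), (" ", " ".toList)]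

def dLocation : PySem.Dict String (List Char) :=
  PySem.Dict.ofList [("z", "sklad".toList), ("x", "stůl".toList), (" ", " ".toList)]

def bindingsArr : List (PySem.Dict String (List Char)) := [dCommand, dObject, dColor, dLocation]

-- 'query += binding_dict[c] + " "' accumulated as a List Char, String.ofList at the end (exact)
def translate_query (chars : List String) : String :=
  let query : List Char :=
    bindingsArr.foldl (fun q d =>
      chars.foldl (fun q c =>
        if d.contains c then q ++ d.getD c [] ++ [' '] else q) q) []
  String.ofList (PySem.Chars.strip query)

-- ===== PORT B =====
-- Source B's module-level literal reverse table _REV: key char -> (category index, word)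
def revTable : PySem.Dict String (Int × List Char) :=
  PySem.Dict.ofList [("1", ((0 : Int), "ukaž".toList)), ("2", ((0 : Int), "seber".toList)), ("3", ((0 : Int), "polož".toList)), ("4", ((0 : Int), "podej".toList)), ("5", ((0 : Int), "ukliď".toList)), ("6", ((0 : Int), "pustit".toList)), ("7", ((0 : Int), "úložiště".toList)), ("8", ((0 : Int), "pozice".toList)), ("9", ((0 : Int), "Odstraň poslední příkaz".toList)), ("0", ((0 : Int), "Odstraň příkaz".toList)), ("q", ((1 : Int), "kostka".toList)), ("w", ((1 : Int), "kolo".toList)), ("e", ((1 : Int), "střecha".toList)), ("r", ((1 : Int), "lžíce".toList)), ("t", ((1 : Int), "koule".toList)), ("y", ((1 : Int), "destička".toList)), ("u", ((1 : Int), "matka".toList)), ("i", ((1 : Int), "šroub".toList)), ("m", ((1 : Int), "klíč".toList)), ("n", ((1 : Int), "šroubovák".toList)), ("b", ((1 : Int), "kleště".toList)), ("v", ((1 : Int), "kladivo".toList)), ("c", ((1 : Int), "to".toList)), ("a", ((2 : Int), "červená".toList)), ("s", ((2 : Int), "vínová".toList)), ("d", ((2 : Int), "modrá".toList)), ("f",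 ((2 : Int), "zelená".toList)), ("g", ((2 : Int), "fialová".toList)), ("h", ((2 : Int), "zlatá".toList)), ("j", ((2 : Int), "bílá".toList)), ("z", ((3 : Int), "sklad".toList)), ("x", ((3 : Int), "stůl".toList))]

-- Source B's tail-recursive _go: one pass, four bucket accumulators, concatenated at the end
def goB (rest : List String) (b0 b1 b2 b3 : List Char) : List Char :=
  match rest with
  | [] => b0 ++ b1 ++ b2 ++ b3
  | c :: rest =>
    if c = " " then goB rest (b0 ++ [' ', ' ']) (b1 ++ [' ', ' ']) (b2 ++ [' ', ' ']) (b3 ++ [' ', ' '])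
    else
      match revTable.get? c with
      | none => goB rest b0 b1 b2 b3
      | some (i, v) =>
        if i = 0 then goB rest (b0 ++ v ++ [' ']) b1 b2 b3
        else if i = 1 then goB rest b0 (b1 ++ v ++ [' ']) b2 b3
        else if i = 2 then goB rest b0 b1 (b2 ++ v ++ [' ']) b3
        else goB rest b0 b1 b2 (b3 ++ v ++ [' '])

def translate_query_alt (chars : List String) : String :=
  String.ofList (PySem.Chars.strip (goB chars [] [] [] []))

-- ===== PRECONDITION & SPEC =====
def Spec_translate_query (chars : List String) (out : String) : Prop := out = translate_query_alt chars
instance (chars : List String) (out : String) : Decidable (Spec_translate_query chars out) := by unfold Spec_translate_query; infer_instance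

-- ===== CLAIM (what is proved, stated in full; the proofs are below) =====
def Claim_equal_translate_query : Prop := ∀ (chars : List String), Dom_translate_query chars → Spec_translate_query chars (translate_query chars)

-- ===== LEMMAS AND PROOFS =====

-- per-character contribution of one binding dict in A's inner loop
def contribA (d : PySem.Dict String (List Char)) (c : String) : List Char :=
  if d.contains c then d.getD c [] ++ [' '] else []

-- which bucket B's dispatch chain sends category index i to
def bucketOf (i : Int) : Int :=
  if i = 0 then 0 else if i = 1 then 1 else if i = 2 then 2 else 3

-- per-character contribution to bucket j in B's single pass
def contribB (j : Int) (c : String) : List Char :=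
  if c = " " then [' ', ' ']
  else
    match revTable.get? c with
    | some (i, v) => if bucketOf i = j then v ++ [' '] else []
    | none => []

lemma loopA (d : PySem.Dict String (List Char)) (chars : List String) (q : List Char) :
    chars.foldl (fun q c =>
        if d.contains c then q ++ d.getD c [] ++ [' '] else q) q
      = q ++ chars.flatMap (contribA d) := by
  induction chars generalizing q with
  | nil => simp
  | cons c cs ih =>
    simp only [List.foldl_cons, List.flatMap_cons, ih, contribA]
    split <;> simp

lemma dCommand_eq : dCommand = PySem.Dict.mk [("1", "ukaž".toList), ("2", "seber".toList), ("3", "polož".toList), ("4", "podej".toList), ("5", "ukliď".toList), ("6", "pustit".toList), ("7", "úložiště".toList), ("8", "pozice".toList), ("9", "Odstraň poslední příkaz".toList), ("0", "Odstraň příkaz".toList), (" ", " ".toList)] := by rfl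

lemma dObject_eq : dObject = PySem.Dict.mk [("q", "kostka".toList), ("w", "kolo".toList), ("e", "střecha".toList), ("r", "lžíce".toList), ("t", "koule".toList), ("y", "destička".toList), ("u", "matka".toList), ("i", "šroub".toList), ("m", "klíč".toList), ("n", "šroubovák".toList), ("b", "kleště".toList), ("v", "kladivo".toList), ("c", "to".toList), (" ", " ".toList)] := by rfl

lemma dColor_eq : dColor = PySem.Dict.mk [("a", "červená".toList), ("s", "vínová".toList), ("d", "modrá".toList), ("f", "zelená".toList), ("g", "fialová".toList), ("h", "zlatá".toList), ("j", "bílá".toList), (" ", " ".toList)] := by rfl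

lemma dLocation_eq : dLocation = PySem.Dict.mk [("z", "sklad".toList), ("x", "stůl".toList), (" ", " ".toList)] := by rfl

set_option maxRecDepth 8000 in
lemma revTable_eq : revTable = PySem.Dict.mk [("1", ((0 : Int), "ukaž".toList)), ("2", ((0 : Int), "seber".toList)), ("3", ((0 : Int), "polož".toList)), ("4", ((0 : Int), "podej".toList)), ("5", ((0 : Int), "ukliď".toList)), ("6", ((0 : Int), "pustit".toList)), ("7", ((0 : Int), "úložiště".toList)), ("8", ((0 : Int), "pozice".toList)), ("9", ((0 : Int), "Odstraň poslední příkaz".toList)), ("0", ((0 : Int), "Odstraň příkaz".toList)), ("q", ((1 : Int), "kostka".toList)), ("w", ((1 : Int), "kolo".toList)), ("e", ((1 : Int), "střecha".toList)), ("r", ((1 : Int), "lžíce".toList)), ("t", ((1 : Int), "koule".toList)), ("y", ((1 : Int), "destička".toList)), ("u", ((1 : Int), "matka".toList)), ("i", ((1 : Int), "šroub".toList)), ("m", ((1 : Int), "klíč".toList)), ("n", ((1 : Int), "šroubovák".toList)), ("b", ((1 : Int), "kleště".toList)), ("v", ((1 : Int), "kladivo".toList)), ("c", ((1 : Int), "to".toList)),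 ("a", ((2 : Int), "červená".toList)), ("s", ((2 : Int), "vínová".toList)), ("d", ((2 : Int), "modrá".toList)), ("f", ((2 : Int), "zelená".toList)), ("g", ((2 : Int), "fialová".toList)), ("h", ((2 : Int), "zlatá".toList)), ("j", ((2 : Int), "bílá".toList)), ("z", ((3 : Int), "sklad".toList)), ("x", ((3 : Int), "stůl".toList))] := by
  rfl

lemma loopB (chars : List String) (b0 b1 b2 b3 : List Char) :
    goB chars b0 b1 b2 b3
      = (b0 ++ chars.flatMap (contribB 0)) ++ (b1 ++ chars.flatMap (contribB 1))
        ++ (b2 ++ chars.flatMap (contribB 2)) ++ (b3 ++ chars.flatMap (contribB 3)) := by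
  induction chars generalizing b0 b1 b2 b3 with
  | nil => simp [goB]
  | cons c cs ih =>
    simp only [goB, List.flatMap_cons]
    by_cases hsp : c = " "
    · simp [hsp, contribB, ih]
    · rcases hm : revTable.get? c with _ | ⟨i, v⟩
      · simp [hsp, hm, contribB, ih]
      · simp only [hsp]
        rcases eq_or_ne i 0 with h0 | h0
        · simp [h0, ih, contribB, hsp, hm, bucketOf]
        rcases eq_or_ne i 1 with h1 | h1
        · simp [h1, ih, contribB, hsp, hm, bucketOf]
        rcases eq_or_ne i 2 with h2 | h2
        · simp [h2, ih, contribB, hsp, hm, bucketOf]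
        · simp [h0, h1, h2, ih, contribB, hsp, hm, bucketOf]

set_option maxRecDepth 4000 in
set_option maxHeartbeats 2000000 in
lemma contrib_eq_0 : ∀ c, contribB 0 c = contribA dCommand c := by
  intro c
  simp only [contribB, contribA, revTable_eq, dCommand_eq, bucketOf]
  by_cases hsp : c = " "
  · subst hsp; decide
  by_cases h0 : c = "1"
  · subst h0; decide
  by_cases h1 : c = "2"
  · subst h1; decide
  by_cases h2 : c = "3"
  · subst h2; decide
  by_cases h3 : c = "4"
  · subst h3; decide
  by_cases h4 : c = "5"
  · subst h4; decide
  by_cases h5 : c = "6"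
  · subst h5; decide
  by_cases h6 : c = "7"
  · subst h6; decide
  by_cases h7 : c = "8"
  · subst h7; decide
  by_cases h8 : c = "9"
  · subst h8; decide
  by_cases h9 : c = "0"
  · subst h9; decide
  by_cases h10 : c = "q"
  · subst h10; decide
  by_cases h11 : c = "w"
  · subst h11; decide
  by_cases h12 : c = "e"
  · subst h12; decide
  by_cases h13 : c = "r"
  · subst h13; decide
  by_cases h14 : c = "t"
  · subst h14; decide
  by_cases h15 : c = "y"
  · subst h15; decide
  by_cases h16 : c = "u"
  · subst h16; decide
  by_cases h17 : c = "i"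
  · subst h17; decide
  by_cases h18 : c = "m"
  · subst h18; decide
  by_cases h19 : c = "n"
  · subst h19; decide
  by_cases h20 : c = "b"
  · subst h20; decide
  by_cases h21 : c = "v"
  · subst h21; decide
  by_cases h22 : c = "c"
  · subst h22; decide
  by_cases h23 : c = "a"
  · subst h23; decide
  by_cases h24 : c = "s"
  · subst h24; decide
  by_cases h25 : c = "d"
  · subst h25; decide
  by_cases h26 : c = "f"
  · subst h26; decide
  by_cases h27 : c = "g"
  · subst h27; decide
  by_cases h28 : c = "h"
  · subst h28; decide
  by_cases h29 : c = "j"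
  · subst h29; decide
  by_cases h30 : c = "z"
  · subst h30; decide
  by_cases h31 : c = "x"
  · subst h31; decide
  have e0 : ("1" == c) = false := beq_eq_false_iff_ne.mpr (Ne.symm h0)
  have e1 : ("2" == c) = false := beq_eq_false_iff_ne.mpr (Ne.symm h1)
  have e2 : ("3" == c) = false := beq_eq_false_iff_ne.mpr (Ne.symm h2)
  have e3 : ("4" == c) = false := beq_eq_false_iff_ne.mpr (Ne.symm h3)
  have e4 : ("5" == c) = false := beq_eq_false_iff_ne.mpr (Ne.symm h4)
  have e5 : ("6" == c) = false := beq_eq_false_iff_ne.mpr (Ne.symm h5)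
  have e6 : ("7" == c) = false := beq_eq_false_iff_ne.mpr (Ne.symm h6)
  have e7 : ("8" == c) = false := beq_eq_false_iff_ne.mpr (Ne.symm h7)
  have e8 : ("9" == c) = false := beq_eq_false_iff_ne.mpr (Ne.symm h8)
  have e9 : ("0" == c) = false := beq_eq_false_iff_ne.mpr (Ne.symm h9)
  have e10 : ("q" == c) = false := beq_eq_false_iff_ne.mpr (Ne.symm h10)
  have e11 : ("w" == c) = false := beq_eq_false_iff_ne.mpr (Ne.symm h11)
  have e12 : ("e" == c) = false := beq_eq_false_iff_ne.mpr (Ne.symm h12)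
  have e13 : ("r" == c) = false := beq_eq_false_iff_ne.mpr (Ne.symm h13)
  have e14 : ("t" == c) = false := beq_eq_false_iff_ne.mpr (Ne.symm h14)
  have e15 : ("y" == c) = false := beq_eq_false_iff_ne.mpr (Ne.symm h15)
  have e16 : ("u" == c) = false := beq_eq_false_iff_ne.mpr (Ne.symm h16)
  have e17 : ("i" == c) = false := beq_eq_false_iff_ne.mpr (Ne.symm h17)
  have e18 : ("m" == c) = false := beq_eq_false_iff_ne.mpr (Ne.symm h18)
  have e19 : ("n" == c) = false := beq_eq_false_iff_ne.mpr (Ne.symm h19)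
  have e20 : ("b" == c) = false := beq_eq_false_iff_ne.mpr (Ne.symm h20)
  have e21 : ("v" == c) = false := beq_eq_false_iff_ne.mpr (Ne.symm h21)
  have e22 : ("c" == c) = false := beq_eq_false_iff_ne.mpr (Ne.symm h22)
  have e23 : ("a" == c) = false := beq_eq_false_iff_ne.mpr (Ne.symm h23)
  have e24 : ("s" == c) = false := beq_eq_false_iff_ne.mpr (Ne.symm h24)
  have e25 : ("d" == c) = false := beq_eq_false_iff_ne.mpr (Ne.symm h25)
  have e26 : ("f" == c) = false := beq_eq_false_iff_ne.mpr (Ne.symm h26)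
  have e27 : ("g" == c) = false := beq_eq_false_iff_ne.mpr (Ne.symm h27)
  have e28 : ("h" == c) = false := beq_eq_false_iff_ne.mpr (Ne.symm h28)
  have e29 : ("j" == c) = false := beq_eq_false_iff_ne.mpr (Ne.symm h29)
  have e30 : ("z" == c) = false := beq_eq_false_iff_ne.mpr (Ne.symm h30)
  have e31 : ("x" == c) = false := beq_eq_false_iff_ne.mpr (Ne.symm h31)
  have hs : (" " == c) = false := beq_eq_false_iff_ne.mpr (Ne.symm hsp)
  have hnilR : (PySem.Dict.mk ([] : List (String × (Int × List Char)))).get? c = none := rfl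
  have hnilA : (PySem.Dict.mk ([] : List (String × List Char))).get? c = none := rfl
  simp only [PySem.Dict.get?_mk_cons, PySem.Dict.contains_mk, PySem.Dict.getD_eq_get?_getD, hs, hnilR, hnilA,
    List.any_cons, List.any_nil, e0, e1, e2, e3, e4, e5, e6, e7, e8, e9, e10, e11, e12, e13, e14, e15, e16, e17, e18, e19, e20, e21, e22, e23, e24, e25, e26, e27, e28, e29, e30, e31, Bool.false_or]
  simpa using hsp

set_option maxRecDepth 4000 in
set_option maxHeartbeats 2000000 in
lemma contrib_eq_1 : ∀ c, contribB 1 c = contribA dObject c := by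
  intro c
  simp only [contribB, contribA, revTable_eq, dObject_eq, bucketOf]
  by_cases hsp : c = " "
  · subst hsp; decide
  by_cases h0 : c = "1"
  · subst h0; decide
  by_cases h1 : c = "2"
  · subst h1; decide
  by_cases h2 : c = "3"
  · subst h2; decide
  by_cases h3 : c = "4"
  · subst h3; decide
  by_cases h4 : c = "5"
  · subst h4; decide
  by_cases h5 : c = "6"
  · subst h5; decide
  by_cases h6 : c = "7"
  · subst h6; decide
  by_cases h7 : c = "8"
  · subst h7; decide
  by_cases h8 : c = "9"
  · subst h8; decide
  by_cases h9 : c = "0"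
  · subst h9; decide
  by_cases h10 : c = "q"
  · subst h10; decide
  by_cases h11 : c = "w"
  · subst h11; decide
  by_cases h12 : c = "e"
  · subst h12; decide
  by_cases h13 : c = "r"
  · subst h13; decide
  by_cases h14 : c = "t"
  · subst h14; decide
  by_cases h15 : c = "y"
  · subst h15; decide
  by_cases h16 : c = "u"
  · subst h16; decide
  by_cases h17 : c = "i"
  · subst h17; decide
  by_cases h18 : c = "m"
  · subst h18; decide
  by_cases h19 : c = "n"
  · subst h19; decide
  by_cases h20 : c = "b"
  · subst h20; decide
  by_cases h21 : c = "v"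
  · subst h21; decide
  by_cases h22 : c = "c"
  · subst h22; decide
  by_cases h23 : c = "a"
  · subst h23; decide
  by_cases h24 : c = "s"
  · subst h24; decide
  by_cases h25 : c = "d"
  · subst h25; decide
  by_cases h26 : c = "f"
  · subst h26; decide
  by_cases h27 : c = "g"
  · subst h27; decide
  by_cases h28 : c = "h"
  · subst h28; decide
  by_cases h29 : c = "j"
  · subst h29; decide
  by_cases h30 : c = "z"
  · subst h30; decide
  by_cases h31 : c = "x"
  · subst h31; decide
  have e0 : ("1" == c) = false := beq_eq_false_iff_ne.mpr (Ne.symm h0)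
  have e1 : ("2" == c) = false := beq_eq_false_iff_ne.mpr (Ne.symm h1)
  have e2 : ("3" == c) = false := beq_eq_false_iff_ne.mpr (Ne.symm h2)
  have e3 : ("4" == c) = false := beq_eq_false_iff_ne.mpr (Ne.symm h3)
  have e4 : ("5" == c) = false := beq_eq_false_iff_ne.mpr (Ne.symm h4)
  have e5 : ("6" == c) = false := beq_eq_false_iff_ne.mpr (Ne.symm h5)
  have e6 : ("7" == c) = false := beq_eq_false_iff_ne.mpr (Ne.symm h6)
  have e7 : ("8" == c) = false := beq_eq_false_iff_ne.mpr (Ne.symm h7)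
  have e8 : ("9" == c) = false := beq_eq_false_iff_ne.mpr (Ne.symm h8)
  have e9 : ("0" == c) = false := beq_eq_false_iff_ne.mpr (Ne.symm h9)
  have e10 : ("q" == c) = false := beq_eq_false_iff_ne.mpr (Ne.symm h10)
  have e11 : ("w" == c) = false := beq_eq_false_iff_ne.mpr (Ne.symm h11)
  have e12 : ("e" == c) = false := beq_eq_false_iff_ne.mpr (Ne.symm h12)
  have e13 : ("r" == c) = false := beq_eq_false_iff_ne.mpr (Ne.symm h13)
  have e14 : ("t" == c) = false := beq_eq_false_iff_ne.mpr (Ne.symm h14)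
  have e15 : ("y" == c) = false := beq_eq_false_iff_ne.mpr (Ne.symm h15)
  have e16 : ("u" == c) = false := beq_eq_false_iff_ne.mpr (Ne.symm h16)
  have e17 : ("i" == c) = false := beq_eq_false_iff_ne.mpr (Ne.symm h17)
  have e18 : ("m" == c) = false := beq_eq_false_iff_ne.mpr (Ne.symm h18)
  have e19 : ("n" == c) = false := beq_eq_false_iff_ne.mpr (Ne.symm h19)
  have e20 : ("b" == c) = false := beq_eq_false_iff_ne.mpr (Ne.symm h20)
  have e21 : ("v" == c) = false := beq_eq_false_iff_ne.mpr (Ne.symm h21)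
  have e22 : ("c" == c) = false := beq_eq_false_iff_ne.mpr (Ne.symm h22)
  have e23 : ("a" == c) = false := beq_eq_false_iff_ne.mpr (Ne.symm h23)
  have e24 : ("s" == c) = false := beq_eq_false_iff_ne.mpr (Ne.symm h24)
  have e25 : ("d" == c) = false := beq_eq_false_iff_ne.mpr (Ne.symm h25)
  have e26 : ("f" == c) = false := beq_eq_false_iff_ne.mpr (Ne.symm h26)
  have e27 : ("g" == c) = false := beq_eq_false_iff_ne.mpr (Ne.symm h27)
  have e28 : ("h" == c) = false := beq_eq_false_iff_ne.mpr (Ne.symm h28)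
  have e29 : ("j" == c) = false := beq_eq_false_iff_ne.mpr (Ne.symm h29)
  have e30 : ("z" == c) = false := beq_eq_false_iff_ne.mpr (Ne.symm h30)
  have e31 : ("x" == c) = false := beq_eq_false_iff_ne.mpr (Ne.symm h31)
  have hs : (" " == c) = false := beq_eq_false_iff_ne.mpr (Ne.symm hsp)
  have hnilR : (PySem.Dict.mk ([] : List (String × (Int × List Char)))).get? c = none := rfl
  have hnilA : (PySem.Dict.mk ([] : List (String × List Char))).get? c = none := rfl
  simp only [PySem.Dict.get?_mk_cons, PySem.Dict.contains_mk, PySem.Dict.getD_eq_get?_getD, hs, hnilR, hnilA,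
    List.any_cons, List.any_nil, e0, e1, e2, e3, e4, e5, e6, e7, e8, e9, e10, e11, e12, e13, e14, e15, e16, e17, e18, e19, e20, e21, e22, e23, e24, e25, e26, e27, e28, e29, e30, e31, Bool.false_or]
  simpa using hsp

set_option maxRecDepth 4000 in
set_option maxHeartbeats 2000000 in
lemma contrib_eq_2 : ∀ c, contribB 2 c = contribA dColor c := by
  intro c
  simp only [contribB, contribA, revTable_eq, dColor_eq, bucketOf]
  by_cases hsp : c = " "
  · subst hsp; decide
  by_cases h0 : c = "1"
  · subst h0; decide
  by_cases h1 : c = "2"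
  · subst h1; decide
  by_cases h2 : c = "3"
  · subst h2; decide
  by_cases h3 : c = "4"
  · subst h3; decide
  by_cases h4 : c = "5"
  · subst h4; decide
  by_cases h5 : c = "6"
  · subst h5; decide
  by_cases h6 : c = "7"
  · subst h6; decide
  by_cases h7 : c = "8"
  · subst h7; decide
  by_cases h8 : c = "9"
  · subst h8; decide
  by_cases h9 : c = "0"
  · subst h9; decide
  by_cases h10 : c = "q"
  · subst h10; decide
  by_cases h11 : c = "w"
  · subst h11; decide
  by_cases h12 : c = "e"
  · subst h12; decide
  by_cases h13 : c = "r"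
  · subst h13; decide
  by_cases h14 : c = "t"
  · subst h14; decide
  by_cases h15 : c = "y"
  · subst h15; decide
  by_cases h16 : c = "u"
  · subst h16; decide
  by_cases h17 : c = "i"
  · subst h17; decide
  by_cases h18 : c = "m"
  · subst h18; decide
  by_cases h19 : c = "n"
  · subst h19; decide
  by_cases h20 : c = "b"
  · subst h20; decide
  by_cases h21 : c = "v"
  · subst h21; decide
  by_cases h22 : c = "c"
  · subst h22; decide
  by_cases h23 : c = "a"
  · subst h23; decide
  by_cases h24 : c = "s"
  · subst h24; decide
  by_cases h25 : c = "d"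
  · subst h25; decide
  by_cases h26 : c = "f"
  · subst h26; decide
  by_cases h27 : c = "g"
  · subst h27; decide
  by_cases h28 : c = "h"
  · subst h28; decide
  by_cases h29 : c = "j"
  · subst h29; decide
  by_cases h30 : c = "z"
  · subst h30; decide
  by_cases h31 : c = "x"
  · subst h31; decide
  have e0 : ("1" == c) = false := beq_eq_false_iff_ne.mpr (Ne.symm h0)
  have e1 : ("2" == c) = false := beq_eq_false_iff_ne.mpr (Ne.symm h1)
  have e2 : ("3" == c) = false := beq_eq_false_iff_ne.mpr (Ne.symm h2)
  have e3 : ("4" == c) = false := beq_eq_false_iff_ne.mpr (Ne.symm h3)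
  have e4 : ("5" == c) = false := beq_eq_false_iff_ne.mpr (Ne.symm h4)
  have e5 : ("6" == c) = false := beq_eq_false_iff_ne.mpr (Ne.symm h5)
  have e6 : ("7" == c) = false := beq_eq_false_iff_ne.mpr (Ne.symm h6)
  have e7 : ("8" == c) = false := beq_eq_false_iff_ne.mpr (Ne.symm h7)
  have e8 : ("9" == c) = false := beq_eq_false_iff_ne.mpr (Ne.symm h8)
  have e9 : ("0" == c) = false := beq_eq_false_iff_ne.mpr (Ne.symm h9)
  have e10 : ("q" == c) = false := beq_eq_false_iff_ne.mpr (Ne.symm h10)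
  have e11 : ("w" == c) = false := beq_eq_false_iff_ne.mpr (Ne.symm h11)
  have e12 : ("e" == c) = false := beq_eq_false_iff_ne.mpr (Ne.symm h12)
  have e13 : ("r" == c) = false := beq_eq_false_iff_ne.mpr (Ne.symm h13)
  have e14 : ("t" == c) = false := beq_eq_false_iff_ne.mpr (Ne.symm h14)
  have e15 : ("y" == c) = false := beq_eq_false_iff_ne.mpr (Ne.symm h15)
  have e16 : ("u" == c) = false := beq_eq_false_iff_ne.mpr (Ne.symm h16)
  have e17 : ("i" == c) = false := beq_eq_false_iff_ne.mpr (Ne.symm h17)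
  have e18 : ("m" == c) = false := beq_eq_false_iff_ne.mpr (Ne.symm h18)
  have e19 : ("n" == c) = false := beq_eq_false_iff_ne.mpr (Ne.symm h19)
  have e20 : ("b" == c) = false := beq_eq_false_iff_ne.mpr (Ne.symm h20)
  have e21 : ("v" == c) = false := beq_eq_false_iff_ne.mpr (Ne.symm h21)
  have e22 : ("c" == c) = false := beq_eq_false_iff_ne.mpr (Ne.symm h22)
  have e23 : ("a" == c) = false := beq_eq_false_iff_ne.mpr (Ne.symm h23)
  have e24 : ("s" == c) = false := beq_eq_false_iff_ne.mpr (Ne.symm h24)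
  have e25 : ("d" == c) = false := beq_eq_false_iff_ne.mpr (Ne.symm h25)
  have e26 : ("f" == c) = false := beq_eq_false_iff_ne.mpr (Ne.symm h26)
  have e27 : ("g" == c) = false := beq_eq_false_iff_ne.mpr (Ne.symm h27)
  have e28 : ("h" == c) = false := beq_eq_false_iff_ne.mpr (Ne.symm h28)
  have e29 : ("j" == c) = false := beq_eq_false_iff_ne.mpr (Ne.symm h29)
  have e30 : ("z" == c) = false := beq_eq_false_iff_ne.mpr (Ne.symm h30)
  have e31 : ("x" == c) = false := beq_eq_false_iff_ne.mpr (Ne.symm h31)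
  have hs : (" " == c) = false := beq_eq_false_iff_ne.mpr (Ne.symm hsp)
  have hnilR : (PySem.Dict.mk ([] : List (String × (Int × List Char)))).get? c = none := rfl
  have hnilA : (PySem.Dict.mk ([] : List (String × List Char))).get? c = none := rfl
  simp only [PySem.Dict.get?_mk_cons, PySem.Dict.contains_mk, PySem.Dict.getD_eq_get?_getD, hs, hnilR, hnilA,
    List.any_cons, List.any_nil, e0, e1, e2, e3, e4, e5, e6, e7, e8, e9, e10, e11, e12, e13, e14, e15, e16, e17, e18, e19, e20, e21, e22, e23, e24, e25, e26, e27, e28, e29, e30, e31, Bool.false_or]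
  simpa using hsp

set_option maxRecDepth 4000 in
set_option maxHeartbeats 2000000 in
lemma contrib_eq_3 : ∀ c, contribB 3 c = contribA dLocation c := by
  intro c
  simp only [contribB, contribA, revTable_eq, dLocation_eq, bucketOf]
  by_cases hsp : c = " "
  · subst hsp; decide
  by_cases h0 : c = "1"
  · subst h0; decide
  by_cases h1 : c = "2"
  · subst h1; decide
  by_cases h2 : c = "3"
  · subst h2; decide
  by_cases h3 : c = "4"
  · subst h3; decide
  by_cases h4 : c = "5"
  · subst h4; decide
  by_cases h5 : c = "6"
  · subst h5; decide
  by_cases h6 : c = "7"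
  · subst h6; decide
  by_cases h7 : c = "8"
  · subst h7; decide
  by_cases h8 : c = "9"
  · subst h8; decide
  by_cases h9 : c = "0"
  · subst h9; decide
  by_cases h10 : c = "q"
  · subst h10; decide
  by_cases h11 : c = "w"
  · subst h11; decide
  by_cases h12 : c = "e"
  · subst h12; decide
  by_cases h13 : c = "r"
  · subst h13; decide
  by_cases h14 : c = "t"
  · subst h14; decide
  by_cases h15 : c = "y"
  · subst h15; decide
  by_cases h16 : c = "u"
  · subst h16; decide
  by_cases h17 : c = "i"
  · subst h17; decide
  by_cases h18 : c = "m"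
  · subst h18; decide
  by_cases h19 : c = "n"
  · subst h19; decide
  by_cases h20 : c = "b"
  · subst h20; decide
  by_cases h21 : c = "v"
  · subst h21; decide
  by_cases h22 : c = "c"
  · subst h22; decide
  by_cases h23 : c = "a"
  · subst h23; decide
  by_cases h24 : c = "s"
  · subst h24; decide
  by_cases h25 : c = "d"
  · subst h25; decide
  by_cases h26 : c = "f"
  · subst h26; decide
  by_cases h27 : c = "g"
  · subst h27; decide
  by_cases h28 : c = "h"
  · subst h28; decide
  by_cases h29 : c = "j"
  · subst h29; decide
  by_cases h30 : c = "z"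
  · subst h30; decide
  by_cases h31 : c = "x"
  · subst h31; decide
  have e0 : ("1" == c) = false := beq_eq_false_iff_ne.mpr (Ne.symm h0)
  have e1 : ("2" == c) = false := beq_eq_false_iff_ne.mpr (Ne.symm h1)
  have e2 : ("3" == c) = false := beq_eq_false_iff_ne.mpr (Ne.symm h2)
  have e3 : ("4" == c) = false := beq_eq_false_iff_ne.mpr (Ne.symm h3)
  have e4 : ("5" == c) = false := beq_eq_false_iff_ne.mpr (Ne.symm h4)
  have e5 : ("6" == c) = false := beq_eq_false_iff_ne.mpr (Ne.symm h5)
  have e6 : ("7" == c) = false := beq_eq_false_iff_ne.mpr (Ne.symm h6)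
  have e7 : ("8" == c) = false := beq_eq_false_iff_ne.mpr (Ne.symm h7)
  have e8 : ("9" == c) = false := beq_eq_false_iff_ne.mpr (Ne.symm h8)
  have e9 : ("0" == c) = false := beq_eq_false_iff_ne.mpr (Ne.symm h9)
  have e10 : ("q" == c) = false := beq_eq_false_iff_ne.mpr (Ne.symm h10)
  have e11 : ("w" == c) = false := beq_eq_false_iff_ne.mpr (Ne.symm h11)
  have e12 : ("e" == c) = false := beq_eq_false_iff_ne.mpr (Ne.symm h12)
  have e13 : ("r" == c) = false := beq_eq_false_iff_ne.mpr (Ne.symm h13)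
  have e14 : ("t" == c) = false := beq_eq_false_iff_ne.mpr (Ne.symm h14)
  have e15 : ("y" == c) = false := beq_eq_false_iff_ne.mpr (Ne.symm h15)
  have e16 : ("u" == c) = false := beq_eq_false_iff_ne.mpr (Ne.symm h16)
  have e17 : ("i" == c) = false := beq_eq_false_iff_ne.mpr (Ne.symm h17)
  have e18 : ("m" == c) = false := beq_eq_false_iff_ne.mpr (Ne.symm h18)
  have e19 : ("n" == c) = false := beq_eq_false_iff_ne.mpr (Ne.symm h19)
  have e20 : ("b" == c) = false := beq_eq_false_iff_ne.mpr (Ne.symm h20)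
  have e21 : ("v" == c) = false := beq_eq_false_iff_ne.mpr (Ne.symm h21)
  have e22 : ("c" == c) = false := beq_eq_false_iff_ne.mpr (Ne.symm h22)
  have e23 : ("a" == c) = false := beq_eq_false_iff_ne.mpr (Ne.symm h23)
  have e24 : ("s" == c) = false := beq_eq_false_iff_ne.mpr (Ne.symm h24)
  have e25 : ("d" == c) = false := beq_eq_false_iff_ne.mpr (Ne.symm h25)
  have e26 : ("f" == c) = false := beq_eq_false_iff_ne.mpr (Ne.symm h26)
  have e27 : ("g" == c) = false := beq_eq_false_iff_ne.mpr (Ne.symm h27)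
  have e28 : ("h" == c) = false := beq_eq_false_iff_ne.mpr (Ne.symm h28)
  have e29 : ("j" == c) = false := beq_eq_false_iff_ne.mpr (Ne.symm h29)
  have e30 : ("z" == c) = false := beq_eq_false_iff_ne.mpr (Ne.symm h30)
  have e31 : ("x" == c) = false := beq_eq_false_iff_ne.mpr (Ne.symm h31)
  have hs : (" " == c) = false := beq_eq_false_iff_ne.mpr (Ne.symm hsp)
  have hnilR : (PySem.Dict.mk ([] : List (String × (Int × List Char)))).get? c = none := rfl
  have hnilA : (PySem.Dict.mk ([] : List (String × List Char))).get? c = none := rfl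
  simp only [PySem.Dict.get?_mk_cons, PySem.Dict.contains_mk, PySem.Dict.getD_eq_get?_getD, hs, hnilR, hnilA,
    List.any_cons, List.any_nil, e0, e1, e2, e3, e4, e5, e6, e7, e8, e9, e10, e11, e12, e13, e14, e15, e16, e17, e18, e19, e20, e21, e22, e23, e24, e25, e26, e27, e28, e29, e30, e31, Bool.false_or]
  simpa using hsp

-- ===== VERDICT (by name: the statement is the Claim_ definition above) =====
theorem translate_query_spec : Claim_equal_translate_query := by
  intro chars _
  unfold Spec_translate_query translate_query translate_query_alt
  rw [loopB]
  simp only [bindingsArr, List.foldl_cons, List.foldl_nil]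
  rw [loopA, loopA, loopA, loopA]
  simp only [List.nil_append, List.append_assoc]
  rw [List.flatMap_congr (fun c _ => contrib_eq_0 c), List.flatMap_congr (fun c _ => contrib_eq_1 c),
      List.flatMap_congr (fun c _ => contrib_eq_2 c), List.flatMap_congr (fun c _ => contrib_eq_3 c)]
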